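-- pv_equiv track=rewrite | github.com/Stermere/Checkers-Engine | src/python/bitboard_converter.py | convert_to_bitboard
-- ===== SOURCE A (Python) =====
-- def convert_to_bitboard(board):
--     # initialze the integers
--     p1bits = 0
--     p2bits = 0
--     p1kbits = 0
--     p2kbits = 0
--     # loop through the elements of the board
--     num = 0
--     for row in board:
--         for item in row:
--             # if player2 king
--             if item == 4:
--                 p2kbits = p2kbits ^ (1 << (num))
--             # if player1 king
--             elif item == 3:
--                 p1kbits = p1kbits ^ (1 << (num))
--             # if player 2 piece
--             elif item == 2:
--                 p2bits = p2bits ^ (1 << (num))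
--             # if player 1 piece
--             elif item == 1:
--                 p1bits = p1bits ^ (1 << (num))
--             # incriment the count
--             num += 1
--     # return the new board
--     return (p1bits, p2bits, p1kbits, p2kbits)
-- ===== SOURCE B (Python) =====
-- def convert_to_bitboard(board):
--     # Flatten once, then build each bitboard with its own targeted pass.
--     cells = [item for row in board for item in row]
--
--     def bits(value):
--         return sum(1 << i for i, c in enumerate(cells) if c == value)
--
--     return (bits(1), bits(2), bits(3), bits(4))
-- ===== Notes on version B (the rewrite author's own statement) =====
-- stated objective: simpler
-- what changed: Instead of one stateful pass that XORs bits into four accumulators under a running cell counter, B flattens the board once and computes each of the four bitboards independently as a sum of 1<<i over the enumerated flat cells matching that piece value.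
import Mathlib
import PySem

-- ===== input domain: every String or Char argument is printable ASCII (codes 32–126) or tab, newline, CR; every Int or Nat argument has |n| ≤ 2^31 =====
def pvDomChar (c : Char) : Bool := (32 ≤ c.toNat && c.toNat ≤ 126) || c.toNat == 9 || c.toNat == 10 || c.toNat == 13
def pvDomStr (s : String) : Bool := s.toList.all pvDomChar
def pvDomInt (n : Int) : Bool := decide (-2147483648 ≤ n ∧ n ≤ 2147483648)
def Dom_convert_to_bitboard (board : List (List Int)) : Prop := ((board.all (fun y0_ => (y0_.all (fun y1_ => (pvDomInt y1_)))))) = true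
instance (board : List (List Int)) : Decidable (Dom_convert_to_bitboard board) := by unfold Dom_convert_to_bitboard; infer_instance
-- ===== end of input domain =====

-- B replaces A's single stateful XOR-accumulating pass by a flatten plus four
-- independent sum-of-powers passes (simpler decomposition, same O(n) cost).


-- ===== PORT A =====
-- state = (p1bits, p2bits, p1kbits, p2kbits, num); num is Python's running
-- counter, always ≥ 0, so carried as a Nat (the shift amount of `1 << num`).
def pvStepA (s : Int × Int × Int × Int × Nat) (item : Int) : Int × Int × Int × Int × Nat :=
  match s with
  | (p1, p2, p1k, p2k, num) =>
    if item = 4 then (p1, p2, p1k, PySem.Int.bxor p2k ((1 : Int) <<< num), num + 1)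
    else if item = 3 then (p1, p2, PySem.Int.bxor p1k ((1 : Int) <<< num), p2k, num + 1)
    else if item = 2 then (p1, PySem.Int.bxor p2 ((1 : Int) <<< num), p1k, p2k, num + 1)
    else if item = 1 then (PySem.Int.bxor p1 ((1 : Int) <<< num), p2, p1k, p2k, num + 1)
    else (p1, p2, p1k, p2k, num + 1)

def convert_to_bitboard (board : List (List Int)) : Int × Int × Int × Int :=
  let s := board.foldl (fun s row => row.foldl pvStepA s) ((0 : Int), (0 : Int), (0 : Int), (0 : Int), (0 : Nat))
  (s.1, s.2.1, s.2.2.1, s.2.2.2.1)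

-- ===== PORT B =====
-- sum(1 << i for i, c in enumerate(cells) if c == value); enumerate indices are
-- ≥ 0, so `.toNat` on the index is exact for Python's `1 << i`.
def pvBits (cells : List Int) (value : Int) : Int :=
  (PySem.List.enumerate cells 0).foldl
    (fun acc p => if p.2 = value then acc + ((1 : Int) <<< p.1.toNat) else acc) 0

def convert_to_bitboard_alt (board : List (List Int)) : Int × Int × Int × Int :=
  let cells := board.flatMap (fun row => row)
  (pvBits cells 1, pvBits cells 2, pvBits cells 3, pvBits cells 4)

-- ===== PRECONDITION & SPEC =====
def Spec_convert_to_bitboard (board : List (List Int)) (out : Int × Int × Int × Int) : Prop := out = convert_to_bitboard_alt board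
instance (board : List (List Int)) (out : Int × Int × Int × Int) : Decidable (Spec_convert_to_bitboard board out) := by unfold Spec_convert_to_bitboard; infer_instance

-- ===== CLAIM (what is proved, stated in full; the proofs are below) =====
def Claim_equal_convert_to_bitboard : Prop := ∀ (board : List (List Int)), Dom_convert_to_bitboard board → Spec_convert_to_bitboard board (convert_to_bitboard board)

-- ===== LEMMAS AND PROOFS =====

-- Spec-side sum: bits of value v among cells, cell k weighted 2^(n+k).
def pvS (v : Int) (cells : List Int) (n : Nat) : Int :=
  match cells with
  | [] => 0
  | c :: t => (if c = v then (2 : Int) ^ n else 0) + pvS v t (n + 1)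

theorem pvS_nil (v : Int) (n : Nat) : pvS v [] n = 0 := rfl
theorem pvS_cons (v c : Int) (t : List Int) (n : Nat) :
    pvS v (c :: t) n = (if c = v then (2 : Int) ^ n else 0) + pvS v t (n + 1) := rfl

-- the Nat fact behind 'XOR of a fresh high bit is addition'
theorem pvXorNat {a n : Nat} (h : a < 2 ^ n) : a ^^^ 2 ^ n = a + 2 ^ n := by
  apply Nat.eq_of_testBit_eq
  intro i
  rcases lt_trichotomy i n with hi | hi | hi
  · rw [Nat.add_comm, Nat.testBit_two_pow_add_gt hi, Nat.testBit_xor,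
      Nat.testBit_two_pow]
    simp [Nat.ne_of_gt hi]
  · subst hi
    rw [Nat.add_comm, Nat.testBit_two_pow_add_eq, Nat.testBit_xor,
      Nat.testBit_two_pow, Nat.testBit_lt_two_pow h]
    simp
  · have h1 : a ^^^ 2 ^ n < 2 ^ i := by
      have := Nat.xor_lt_two_pow (n := i) (Nat.lt_of_lt_of_le h (Nat.pow_le_pow_right (by norm_num) hi.le))
        (Nat.pow_lt_pow_right (by norm_num) hi)
      exact this
    have h2 : a + 2 ^ n < 2 ^ i := by
      have : a + 2 ^ n < 2 ^ (n + 1) := by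
        have := Nat.pow_succ 2 n ▸ (by omega : a + 2 ^ n < 2 ^ n * 2)
        omega
      exact Nat.lt_of_lt_of_le this (Nat.pow_le_pow_right (by norm_num) hi)
    rw [Nat.testBit_lt_two_pow h1, Nat.testBit_lt_two_pow h2]

theorem pvXorInt {a : Int} {n : Nat} (h0 : 0 ≤ a) (h : a < 2 ^ n) :
    PySem.Int.bxor a ((1 : Int) <<< n) = a + 2 ^ n := by
  have ha : a = (a.toNat : Int) := (Int.toNat_of_nonneg h0).symm
  have hs : ((1 : Int) <<< n) = ((2 ^ n : Nat) : Int) := by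
    rw [Int.shiftLeft_eq]; push_cast; ring
  have hlt : a.toNat < 2 ^ n := by
    have : (a.toNat : Int) < ((2 ^ n : Nat) : Int) := by push_cast; omega
    exact_mod_cast this
  rw [ha, hs, PySem.Int.bxor_natCast, pvXorNat hlt]
  push_cast; ring

-- invariant of A's inner loop over a flat list of cells
theorem pvLoopA (cells : List Int) : ∀ (n : Nat) (a b c d : Int),
    0 ≤ a → a < 2 ^ n → 0 ≤ b → b < 2 ^ n → 0 ≤ c → c < 2 ^ n → 0 ≤ d → d < 2 ^ n →
    cells.foldl pvStepA (a, b, c, d, n) =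
      (a + pvS 1 cells n, b + pvS 2 cells n, c + pvS 3 cells n, d + pvS 4 cells n,
       n + cells.length) := by
  induction cells with
  | nil => intro n a b c d _ _ _ _ _ _ _ _; simp [pvS_nil]
  | cons x t ih =>
    intro n a b c d ha0 ha hb0 hb hc0 hc hd0 hd
    have hpow : (2 : Int) ^ n < 2 ^ (n + 1) := by
      have : (2:Int) ^ (n+1) = 2 ^ n * 2 := by ring
      nlinarith [pow_pos (by norm_num : (0:Int) < 2) n]
    have hpos : (0 : Int) < 2 ^ n := pow_pos (by norm_num) n
    simp only [List.foldl_cons, pvStepA]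
    split_ifs with h4 h3 h2 h1
    · rw [pvXorInt hd0 hd,
        ih (n+1) a b c (d + 2 ^ n) ha0 (ha.trans hpow) hb0 (hb.trans hpow)
          hc0 (hc.trans hpow) (by omega) (by rw [pow_succ]; omega)]
      subst h4; simp [pvS_cons]; and_intros <;> ring
    · rw [pvXorInt hc0 hc,
        ih (n+1) a b (c + 2 ^ n) d ha0 (ha.trans hpow) hb0 (hb.trans hpow)
          (by omega) (by rw [pow_succ]; omega) hd0 (hd.trans hpow)]
      subst h3; simp [pvS_cons]; and_intros <;> ring
    · rw [pvXorInt hb0 hb,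
        ih (n+1) a (b + 2 ^ n) c d ha0 (ha.trans hpow) (by omega) (by rw [pow_succ]; omega)
          hc0 (hc.trans hpow) hd0 (hd.trans hpow)]
      subst h2; simp [pvS_cons]; and_intros <;> ring
    · rw [pvXorInt ha0 ha,
        ih (n+1) (a + 2 ^ n) b c d (by omega) (by rw [pow_succ]; omega)
          hb0 (hb.trans hpow) hc0 (hc.trans hpow) hd0 (hd.trans hpow)]
      subst h1; simp [pvS_cons]; and_intros <;> ring
    · rw [ih (n+1) a b c d ha0 (ha.trans hpow) hb0 (hb.trans hpow)
          hc0 (hc.trans hpow) hd0 (hd.trans hpow)]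
      simp [pvS_cons, h1, h2, h3, h4]
      omega

-- B's enumerate fold computes the same sum
theorem pvBitsFold (v : Int) (cells : List Int) : ∀ (n : Nat) (acc : Int),
    (PySem.List.enumerate cells (n : Int)).foldl
      (fun acc p => if p.2 = v then acc + ((1 : Int) <<< p.1.toNat) else acc) acc
      = acc + pvS v cells n := by
  induction cells with
  | nil => intro n acc; simp [PySem.List.enumerate_nil, pvS_nil]
  | cons c t ih =>
    intro n acc
    rw [PySem.List.enumerate_cons]
    simp only [List.foldl_cons]
    have hn : ((n : Int) + 1) = ((n + 1 : Nat) : Int) := by push_cast; ring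
    rw [hn, ih (n + 1)]
    have ht : ((n : Int)).toNat = n := Int.toNat_natCast n
    rw [pvS_cons]
    split
    · rw [ht, Int.shiftLeft_natCast_right, Int.shiftLeft_eq]; ring
    · ring

theorem pvBits_eq (v : Int) (cells : List Int) : pvBits cells v = pvS v cells 0 := by
  have := pvBitsFold v cells 0 0
  simpa [pvBits] using this

-- nested foldl over rows = foldl over the flattened board
theorem pvNested (board : List (List Int)) (init : Int × Int × Int × Int × Nat) :
    board.foldl (fun s row => row.foldl pvStepA s) init
      = (board.flatMap (fun row => row)).foldl pvStepA init := by
  induction board generalizing init with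
  | nil => simp
  | cons r t ih => simp [List.flatMap_cons, List.foldl_append, ih]

-- ===== VERDICT (by name: the statement is the Claim_ definition above) =====
theorem convert_to_bitboard_spec : Claim_equal_convert_to_bitboard := by
  intro board _
  unfold Spec_convert_to_bitboard convert_to_bitboard convert_to_bitboard_alt
  rw [pvNested]
  rw [pvLoopA (board.flatMap (fun row => row)) 0 0 0 0 0 (by norm_num) (by norm_num)
    (by norm_num) (by norm_num) (by norm_num) (by norm_num) (by norm_num) (by norm_num)]
  simp [pvBits_eq]
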